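-- pv_equiv track=rewrite | github.com/slavlotski/Tomorrow-s-analysts-ds-bootcamp | handlers/command_handlers.py | create_chatgpt_request
-- ===== SOURCE A (Python) =====
-- def create_chatgpt_request(files_content):
--     project_structure = []
--     file_descriptions = []
--
--     total_length = 0
--     max_length = 4000
--
--     for file_path, content in files_content.items():
--         if total_length + len(content) > max_length:
--             break
--         project_structure.append(file_path)
--         file_descriptions.append(f"File: {file_path}\nContent:\n{content}\n")
--         total_length += len(content)
--
--     request_text = (
--         "You are a documentation generator. Please provide detailed documentation for the following project.\n\n"
--         "The documentation should include:\n"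
--         "1. A high-level description of each directory.\n"
--         "2. A detailed description of each file within the directories.\n"
--         "3. Recommendations on how to run the code.\n\n"
--         "Project Structure:\n" + "\n".join(project_structure) + "\n\n"
--         "File Descriptions:\n" + "\n".join(file_descriptions) + "\n\n"
--         "Additionally, provide a brief recommendation on how to run the code."
--     )
--
--     return request_text
-- ===== SOURCE B (Python) =====
-- def create_chatgpt_request(files_content):
--     # Prefix sums of content lengths.
--     items = list(files_content.items())
--     cums = []
--     t = 0
--     for _, content in items:
--         t += len(content)
--         cums.append(t)
--     # cums is nondecreasing (lengths are >= 0), so the number of leading files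
--     # whose inclusive cumulative length stays <= 4000 can be found by binary
--     # search (bisect_right of 4000 in cums).
--     lo, hi = 0, len(cums)
--     while lo < hi:
--         mid = (lo + hi) // 2
--         if 4000 < cums[mid]:
--             hi = mid
--         else:
--             lo = mid + 1
--     selected = items[:lo]
--     project_structure = "\n".join(path for path, _ in selected)
--     file_descriptions = "\n".join(
--         f"File: {path}\nContent:\n{content}\n" for path, content in selected
--     )
--     return (
--         "You are a documentation generator. Please provide detailed documentation for the following project.\n\n"
--         "The documentation should include:\n"
--         "1. A high-level description of each directory.\n"
--         "2. A detailed description of each file within the directories.\n"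
--         "3. Recommendations on how to run the code.\n\n"
--         "Project Structure:\n" + project_structure + "\n\n"
--         "File Descriptions:\n" + file_descriptions + "\n\n"
--         "Additionally, provide a brief recommendation on how to run the code."
--     )
-- ===== Notes on version B (the rewrite author's own statement) =====
-- stated objective: alternative
-- what changed: Replaces A's interleaved accumulate-and-break loop by a prefix-sums-plus-binary-search algorithm: B first builds the list of cumulative content lengths, then finds the cutoff index with a hand-rolled bisect_right (correct since lengths are nonnegative, so the cumulative sums are nondecreasing), and finally builds both text blocks from the selected prefix by comprehensions.
import Mathlib
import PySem

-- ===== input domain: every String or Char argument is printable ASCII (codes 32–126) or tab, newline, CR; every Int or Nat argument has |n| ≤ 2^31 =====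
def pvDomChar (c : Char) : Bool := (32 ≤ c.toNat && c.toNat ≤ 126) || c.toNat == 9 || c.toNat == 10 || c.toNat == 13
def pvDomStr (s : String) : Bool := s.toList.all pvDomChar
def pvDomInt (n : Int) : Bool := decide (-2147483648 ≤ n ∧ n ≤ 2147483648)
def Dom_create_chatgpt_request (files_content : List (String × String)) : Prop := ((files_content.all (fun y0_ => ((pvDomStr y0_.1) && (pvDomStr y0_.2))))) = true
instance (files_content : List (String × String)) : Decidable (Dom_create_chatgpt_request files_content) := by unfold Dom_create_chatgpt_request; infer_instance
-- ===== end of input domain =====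

-- B replaces A's accumulate-and-break loop by prefix sums of content lengths plus a
-- binary search (bisect_right) for the cutoff; objective: alternative algorithm, same cost.

def pvHeader : String := "You are a documentation generator. Please provide detailed documentation for the following project.\n\nThe documentation should include:\n1. A high-level description of each directory.\n2. A detailed description of each file within the directories.\n3. Recommendations on how to run the code.\n\nProject Structure:\n"

def pvFooter : String := "Additionally, provide a brief recommendation on how to run the code."

-- ===== PORT A =====
-- A's for-loop with break: structural recursion carrying total, building both lists together.
def pvLoopA : List (String × String) → Int → List String × List String
  | [], _ => ([], [])
  | (file_path, content) :: rest, total =>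
    if total + PySem.Str.len content > 4000 then ([], [])
    else
      let pr := pvLoopA rest (total + PySem.Str.len content)
      (file_path :: pr.1,
       ("File: " ++ file_path ++ "\nContent:\n" ++ content ++ "\n") :: pr.2)

def create_chatgpt_request (files_content : List (String × String)) : String :=
  let r := pvLoopA files_content 0
  pvHeader ++ PySem.Str.join "\n" r.1 ++ "\n\n" ++ "File Descriptions:\n"
    ++ PySem.Str.join "\n" r.2 ++ "\n\n" ++ pvFooter

-- ===== PORT B =====
-- Source B phase 1: running prefix sums of the content lengths.
def pvCums : List (String × String) → Int → List Int
  | [], _ => []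
  | (_, content) :: rest, t =>
    (t + PySem.Str.len content) :: pvCums rest (t + PySem.Str.len content)

-- Source B phase 2: hand-rolled bisect_right of x in a, over the index range [lo, hi).
def pvBisect (a : List Int) (x : Int) (lo hi : Nat) : Nat :=
  if h : lo < hi then
    let mid := (lo + hi) / 2
    if x < a.getD mid 0 then pvBisect a x lo mid
    else pvBisect a x (mid + 1) hi
  else lo
termination_by hi - lo
decreasing_by all_goals omega

def create_chatgpt_request_alt (files_content : List (String × String)) : String :=
  let cums := pvCums files_content 0
  let k := pvBisect cums 4000 0 cums.length
  let selected := files_content.take k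
  let project_structure := PySem.Str.join "\n" (selected.map (fun pc => pc.1))
  let file_descriptions := PySem.Str.join "\n"
    (selected.map (fun pc => "File: " ++ pc.1 ++ "\nContent:\n" ++ pc.2 ++ "\n"))
  pvHeader ++ project_structure ++ "\n\n" ++ "File Descriptions:\n"
    ++ file_descriptions ++ "\n\n" ++ pvFooter

-- ===== PRECONDITION & SPEC =====
def Spec_create_chatgpt_request (files_content : List (String × String)) (out : String) : Prop := out = create_chatgpt_request_alt files_content
instance (files_content : List (String × String)) (out : String) : Decidable (Spec_create_chatgpt_request files_content out) := by unfold Spec_create_chatgpt_request; infer_instance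

-- ===== CLAIM =====
def Claim_equal_create_chatgpt_request : Prop := ∀ (files_content : List (String × String)), Dom_create_chatgpt_request files_content → Spec_create_chatgpt_request files_content (create_chatgpt_request files_content)

-- ===== LEMMAS AND PROOFS =====

-- The number of leading files A keeps = length of the ≤-4000 prefix of the cumulative sums.
def pvW (xs : List (String × String)) (t : Int) : Nat :=
  ((pvCums xs t).takeWhile (fun y => decide (y ≤ 4000))).length

-- takeWhile-length characterization, generic.
theorem takeWhile_len_le {l : List Int} {x : Int} :
    ∀ i, i < (l.takeWhile (fun y => decide (y ≤ x))).length → l.getD i 0 ≤ x := by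
  induction l with
  | nil => simp
  | cons hd tl ih =>
    intro i hi
    by_cases h : hd ≤ x
    · simp [h] at hi
      cases i with
      | zero => simpa using h
      | succ j => exact ih j (by omega)
    · simp [h] at hi

theorem takeWhile_len_gt {l : List Int} {x : Int}
    (h : (l.takeWhile (fun y => decide (y ≤ x))).length < l.length) :
    x < l.getD (l.takeWhile (fun y => decide (y ≤ x))).length 0 := by
  induction l with
  | nil => simp at h
  | cons hd tl ih =>
    by_cases hh : hd ≤ x
    · simp only [List.takeWhile_cons, decide_eq_true_eq, hh, if_true] at h ⊢
      simp only [List.length_cons] at h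
      have := ih (by omega)
      simpa using this
    · simp only [List.takeWhile_cons, hh, decide_false, Bool.false_eq_true]
      simpa using hh

theorem takeWhile_len_le_len {l : List Int} {x : Int} :
    (l.takeWhile (fun y => decide (y ≤ x))).length ≤ l.length :=
  (List.takeWhile_prefix _).length_le

-- pvCums is monotone in the index (lengths are nonnegative).
theorem pvCums_lb : ∀ (xs : List (String × String)) (t : Int) (y : Int),
    y ∈ pvCums xs t → t ≤ y := by
  intro xs
  induction xs with
  | nil => intro t y h; simp [pvCums] at h
  | cons hd tl ih =>
    intro t y h
    obtain ⟨p, c⟩ := hd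
    simp only [pvCums, List.mem_cons] at h
    have hlen : (0:Int) ≤ PySem.Str.len c := by
      simp [PySem.Str.len_eq]
    rcases h with h | h
    · omega
    · have := ih (t + PySem.Str.len c) y h; omega

theorem pvCums_sorted : ∀ (xs : List (String × String)) (t : Int),
    (pvCums xs t).Pairwise (· ≤ ·) := by
  intro xs
  induction xs with
  | nil => intro t; simp [pvCums]
  | cons hd tl ih =>
    intro t
    obtain ⟨p, c⟩ := hd
    simp only [pvCums]
    exact List.pairwise_cons.mpr ⟨fun y hy => pvCums_lb _ _ _ hy, ih _⟩

theorem sorted_getD_mono {l : List Int} (hs : l.Pairwise (· ≤ ·)) :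
    ∀ i j, i ≤ j → j < l.length → l.getD i 0 ≤ l.getD j 0 := by
  intro i j hij hj
  have hi : i < l.length := by omega
  rw [List.getD_eq_getElem l 0 hi, List.getD_eq_getElem l 0 hj]
  rcases Nat.lt_or_ge i j with h | h
  · exact List.Pairwise.rel_get_of_lt hs (by simpa using h)
  · have : i = j := by omega
    subst this; simp

-- bisect_right on a monotone list computes exactly the takeWhile length w.
theorem pvBisect_eq (a : List Int) (x : Int)
    (mono : ∀ i j, i ≤ j → j < a.length → a.getD i 0 ≤ a.getD j 0) :
    ∀ n lo hi, hi - lo ≤ n → hi ≤ a.length →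
      lo ≤ (a.takeWhile (fun y => decide (y ≤ x))).length →
      (a.takeWhile (fun y => decide (y ≤ x))).length ≤ hi →
      pvBisect a x lo hi = (a.takeWhile (fun y => decide (y ≤ x))).length := by
  intro n
  induction n with
  | zero =>
    intro lo hi hn hha hlo hhi
    rw [pvBisect]
    have : ¬ lo < hi := by omega
    rw [dif_neg this]; omega
  | succ m ih =>
    intro lo hi hn hha hlo hhi
    set w := (a.takeWhile (fun y => decide (y ≤ x))).length with hw
    rw [pvBisect]
    by_cases h : lo < hi
    · rw [dif_pos h]
      set mid := (lo + hi) / 2 with hmid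
      have hmlo : lo ≤ mid := by omega
      have hmhi : mid < hi := by omega
      by_cases hc : x < a.getD mid 0
      · rw [if_pos hc]
        -- a[mid] > x, so w ≤ mid
        have hwmid : w ≤ mid := by
          by_contra hcon
          have : a.getD mid 0 ≤ x := takeWhile_len_le mid (by omega)
          omega
        exact ih lo mid (by omega) (by omega) hlo hwmid
      · rw [if_neg hc]
        -- a[mid] ≤ x, so mid < w
        have hwmid : mid < w := by
          by_contra hcon
          have hwlt : w < a.length := by omega
          have h1 : x < a.getD w 0 := takeWhile_len_gt hwlt
          have h2 : a.getD w 0 ≤ a.getD mid 0 := mono w mid (by omega) (by omega)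
          omega
        exact ih (mid + 1) hi (by omega) hha (by omega) hhi
    · rw [dif_neg h]; omega

-- A's loop result is exactly the two projections of the first pvW files.
theorem pvLoopA_eq_take (xs : List (String × String)) : ∀ (t : Int),
    pvLoopA xs t =
      ((xs.take (pvW xs t)).map (fun pc => pc.1),
       (xs.take (pvW xs t)).map (fun pc => "File: " ++ pc.1 ++ "\nContent:\n" ++ pc.2 ++ "\n")) := by
  induction xs with
  | nil => intro t; simp [pvLoopA, pvW, pvCums]
  | cons hd tl ih =>
    intro t
    obtain ⟨p, c⟩ := hd
    simp only [pvLoopA, pvW, pvCums, gt_iff_lt, List.takeWhile_cons, decide_eq_true_eq]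
    by_cases h : 4000 < t + PySem.Str.len c
    · rw [if_pos h, if_neg (by omega)]
      simp
    · rw [if_neg h, if_pos (by omega), ih]
      simp only [List.length_cons, List.take_succ_cons, List.map_cons]
      rfl

-- ===== VERDICT =====
theorem create_chatgpt_request_spec : Claim_equal_create_chatgpt_request := by
  intro files_content _
  unfold Spec_create_chatgpt_request create_chatgpt_request create_chatgpt_request_alt
  rw [pvLoopA_eq_take]
  have hk : pvBisect (pvCums files_content 0) 4000 0 (pvCums files_content 0).length
      = pvW files_content 0 := by
    exact pvBisect_eq (pvCums files_content 0) 4000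
      (sorted_getD_mono (pvCums_sorted files_content 0))
      (pvCums files_content 0).length 0 (pvCums files_content 0).length
      (by omega) (le_refl _) (Nat.zero_le _) takeWhile_len_le_len
  simp only [hk, pvW]
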